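-- pv_equiv track=rewrite | github.com/nicholas-camarda/ffbayes | src/ffbayes/draft_strategy/bayesian_draft_strategy.py | _calculate_team_picks
-- ===== SOURCE A (Python) =====
-- from typing import Any, Dict, List
--
-- def _calculate_team_picks(draft_position: int, league_size: int) -> List[int]:
--     """Calculate all picks for a team in snake draft."""
--     picks = []
--     for round_num in range(1, 17):  # Assume 16 rounds
--         if round_num % 2 == 1:  # Odd rounds: forward
--             pick = draft_position + (round_num - 1) * league_size
--         else:  # Even rounds: backward
--             pick = (league_size - draft_position + 1) + (round_num - 1) * league_size
--
--         picks.append(pick)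
--
--     return picks
-- ===== SOURCE B (Python) =====
-- from typing import List
--
-- def _calculate_team_picks(draft_position: int, league_size: int) -> List[int]:
--     """Snake draft picks via a reflection recurrence: each next pick is the
--     current pick mirrored across the end-of-round boundary (no per-round
--     parity branch, no per-round closed form)."""
--     picks = []
--     pick = draft_position
--     for round_num in range(1, 17):
--         picks.append(pick)
--         pick = 2 * round_num * league_size + 1 - pick
--     return picks
-- ===== Notes on version B (the rewrite author's own statement) =====
-- stated objective: simpler
-- what changed: Replaces the per-round parity branch and closed-form pick formula by a stateful reflection recurrence (next pick = 2*round*league_size + 1 - current pick), carrying one accumulator instead of recomputing each pick from the round number.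
import Mathlib
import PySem

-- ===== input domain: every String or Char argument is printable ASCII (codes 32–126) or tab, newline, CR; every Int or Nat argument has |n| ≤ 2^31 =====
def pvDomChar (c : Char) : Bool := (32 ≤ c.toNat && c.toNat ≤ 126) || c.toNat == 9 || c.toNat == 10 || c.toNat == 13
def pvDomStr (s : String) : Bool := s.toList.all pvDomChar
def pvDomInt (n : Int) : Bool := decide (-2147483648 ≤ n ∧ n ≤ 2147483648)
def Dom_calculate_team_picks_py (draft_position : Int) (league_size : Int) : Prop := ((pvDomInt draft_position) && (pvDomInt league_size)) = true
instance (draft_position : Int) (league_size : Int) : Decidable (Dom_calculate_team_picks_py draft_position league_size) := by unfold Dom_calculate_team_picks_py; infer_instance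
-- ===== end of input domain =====

-- B replaces A's per-round parity branch and closed-form pick formula by a
-- stateful reflection recurrence (next pick = 2*round*L + 1 - pick): simpler.

-- ===== PORT A =====
-- literal port of A: fold over range(1,17), parity branch per round
def calculate_team_picks_py (draft_position : Int) (league_size : Int) : List Int :=
  (PySem.List.pyRange 1 17 1).foldl (fun picks round_num =>
    let pick :=
      if round_num % 2 == 1 then
        draft_position + (round_num - 1) * league_size
      else
        (league_size - draft_position + 1) + (round_num - 1) * league_size
    picks ++ [pick]) []

-- ===== PORT B =====
-- port of B: reflection recurrence, state = (picks so far, current pick)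
def calculate_team_picks_py_alt (draft_position : Int) (league_size : Int) : List Int :=
  ((PySem.List.pyRange 1 17 1).foldl (fun (st : List Int × Int) round_num =>
    (st.1 ++ [st.2], 2 * round_num * league_size + 1 - st.2)) ([], draft_position)).1

-- ===== PRECONDITION & SPEC =====
def Spec_calculate_team_picks_py (draft_position : Int) (league_size : Int) (out : List Int) : Prop := out = calculate_team_picks_py_alt draft_position league_size
instance (draft_position : Int) (league_size : Int) (out : List Int) : Decidable (Spec_calculate_team_picks_py draft_position league_size out) := by unfold Spec_calculate_team_picks_py; infer_instance

-- ===== CLAIM =====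
def Claim_equal_calculate_team_picks_py : Prop := ∀ (draft_position : Int) (league_size : Int), Dom_calculate_team_picks_py draft_position league_size → Spec_calculate_team_picks_py draft_position league_size (calculate_team_picks_py draft_position league_size)

-- ===== LEMMAS AND PROOFS =====

-- ===== VERDICT =====
theorem calculate_team_picks_py_spec : Claim_equal_calculate_team_picks_py := by
  intro d l _
  unfold Spec_calculate_team_picks_py calculate_team_picks_py calculate_team_picks_py_alt
  simp [PySem.List.pyRange, List.range_succ]
  constructor
  · ring
  · refine ⟨by ring, by ring, by ring, by ring, by ring, by ring, by ring, by ring, by ring, by ring, by ring, by ring, by ring, by ring⟩
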